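-- pv_equiv track=rewrite | github.com/Brismi428/thepopebot | systems/marketing-pipeline/tools/score_leads.py | score_accessibility
-- ===== SOURCE A (Python) =====
-- def score_accessibility(lead: dict) -> int:
--     """Score decision maker accessibility (0-15 points)."""
--     decision_makers = lead.get("decision_makers", [])
--     if not decision_makers:
--         return 2  # No contacts found
--
--     score = 0
--
--     # Check for direct emails
--     has_email = any(dm.get("email") for dm in decision_makers)
--     if has_email:
--         score += 10
--
--     # Check for LinkedIn profiles
--     has_linkedin = any(dm.get("linkedin_url") for dm in decision_makers)
--     if has_linkedin:
--         score += 3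
--
--     # Multiple contacts available
--     if len(decision_makers) >= 2:
--         score += 2
--
--     return min(score, 15)
-- ===== SOURCE B (Python) =====
-- POINTS = {"email": 10, "linkedin_url": 3}
--
--
-- def score_accessibility(lead: dict) -> int:
--     """Score decision maker accessibility (0-15 points)."""
--     decision_makers = lead.get("decision_makers", [])
--     if not decision_makers:
--         return 2  # No contacts found
--
--     base = 2 if len(decision_makers) >= 2 else 0
--
--     # Shrinking worklist of signals still missing; stop early once all found.
--     missing = ["email", "linkedin_url"]
--     for dm in decision_makers:
--         missing = [k for k in missing if not dm.get(k)]
--         if not missing: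
--             break
--
--     return base + sum(POINTS[k] for k in ("email", "linkedin_url") if k not in missing)
-- ===== Notes on version B (the rewrite author's own statement) =====
-- stated objective: alternative
-- what changed: Replaces the two independent any() scans, the len check and the min cap with a shrinking worklist of still-missing signal keys filtered against each contact with early termination once empty, and a points table summed over the signals that were found.
import Mathlib
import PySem

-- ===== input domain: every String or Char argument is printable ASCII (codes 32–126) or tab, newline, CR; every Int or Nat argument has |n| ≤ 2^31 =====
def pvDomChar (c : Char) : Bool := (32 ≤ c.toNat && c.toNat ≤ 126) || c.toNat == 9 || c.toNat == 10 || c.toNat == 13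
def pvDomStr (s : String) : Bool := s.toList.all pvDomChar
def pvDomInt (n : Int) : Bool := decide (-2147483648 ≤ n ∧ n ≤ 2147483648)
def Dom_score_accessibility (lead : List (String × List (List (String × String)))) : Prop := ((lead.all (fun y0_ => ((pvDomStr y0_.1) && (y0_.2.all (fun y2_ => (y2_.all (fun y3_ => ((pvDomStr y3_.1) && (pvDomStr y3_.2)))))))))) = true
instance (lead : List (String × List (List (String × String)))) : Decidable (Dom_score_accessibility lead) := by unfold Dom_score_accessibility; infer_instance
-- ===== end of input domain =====

-- B replaces A's two any-scans + len + min cap by a shrinking worklist of missing signal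
-- keys with early exit and a points-table sum; alternative decomposition, return value proved equal.

-- shared helper: Python dict.get on an association list (first match, none if absent)
def pyAssocGet {a : Type} (d : List (String × a)) (k : String) : Option a :=
  match d with
  | [] => none
  | (k', v) :: rest => if k' == k then some v else pyAssocGet rest k

-- truthiness of dm.get(key): missing or empty string is falsy
def pyTruthyGet (dm : List (String × String)) (k : String) : Bool :=
  match pyAssocGet dm k with
  | none => false
  | some s => !(s == "")

-- ===== PORT A =====
def score_accessibility (lead : List (String × List (List (String × String)))) : Int :=
  let decision_makers := (pyAssocGet lead "decision_makers").getD []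
  if decision_makers.isEmpty then 2
  else
    let score : Int := 0
    let score := if decision_makers.any (fun dm => pyTruthyGet dm "email") then score + 10 else score
    let score := if decision_makers.any (fun dm => pyTruthyGet dm "linkedin_url") then score + 3 else score
    let score := if decision_makers.length >= 2 then score + 2 else score
    min score 15

-- ===== PORT B =====
-- B's worklist loop with `break`: filter the missing keys against each contact, stop when empty
def pvMissingLoop (dms : List (List (String × String))) (missing : List String) : List String :=
  match dms with
  | [] => missing
  | dm :: rest =>
      let missing' := missing.filter (fun k => !(pyTruthyGet dm k))
      if missing'.isEmpty then missing' else pvMissingLoop rest missing'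

def pvPoints : List (String × Int) := [("email", 10), ("linkedin_url", 3)]

def score_accessibility_alt (lead : List (String × List (List (String × String)))) : Int :=
  let decision_makers := (pyAssocGet lead "decision_makers").getD []
  if decision_makers.isEmpty then 2
  else
    let base : Int := if decision_makers.length >= 2 then 2 else 0
    let missing := pvMissingLoop decision_makers ["email", "linkedin_url"]
    base + (((["email", "linkedin_url"].filter (fun k => !(missing.contains k))).map
      (fun k => (pyAssocGet pvPoints k).getD 0)).sum)

-- ===== PRECONDITION & SPEC =====
def Spec_score_accessibility (lead : List (String × List (List (String × String)))) (out : Int) : Prop := out = score_accessibility_alt lead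
instance (lead : List (String × List (List (String × String)))) (out : Int) : Decidable (Spec_score_accessibility lead out) := by unfold Spec_score_accessibility; infer_instance

-- ===== CLAIM (what is proved, stated in full; the proofs are below) =====
def Claim_equal_score_accessibility : Prop := ∀ (lead : List (String × List (List (String × String)))), Dom_score_accessibility lead → Spec_score_accessibility lead (score_accessibility lead)


-- ===== LEMMAS AND PROOFS =====

-- the early-exit worklist loop computes the same as filtering by "no contact has the key truthy"
lemma pvMissingLoop_eq (dms : List (List (String × String))) (missing : List String) :
    pvMissingLoop dms missing
      = missing.filter (fun k => !(dms.any (fun dm => pyTruthyGet dm k))) := by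
  induction dms generalizing missing with
  | nil => simp [pvMissingLoop]
  | cons dm rest ih =>
      simp only [pvMissingLoop]
      by_cases h : (missing.filter (fun k => !(pyTruthyGet dm k))).isEmpty
      · simp only [h, if_true]
        rw [List.isEmpty_iff] at h
        rw [h]
        symm
        rw [List.filter_eq_nil_iff]
        intro k hk
        have : pyTruthyGet dm k = true := by
          by_contra hne
          have : k ∈ missing.filter (fun k => !(pyTruthyGet dm k)) :=
            List.mem_filter.mpr ⟨hk, by simpa using hne⟩
          simp [h] at this
        simp [List.any_cons, this]
      · simp only [h, ih, List.filter_filter]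
        apply List.filter_congr
        intro k _
        cases hdm : pyTruthyGet dm k <;> simp [List.any_cons, hdm]

-- ===== VERDICT (by name: the statement is the Claim_ definition above) =====
theorem score_accessibility_spec : Claim_equal_score_accessibility := by
  intro lead _
  unfold Spec_score_accessibility score_accessibility score_accessibility_alt
  set dms := (pyAssocGet lead "decision_makers").getD [] with hdms
  by_cases he : dms.isEmpty
  · simp [he]
  · simp only [he, Bool.false_eq_true, if_false, pvMissingLoop_eq]
    cases h1 : dms.any (fun dm => pyTruthyGet dm "email") <;>
    cases h2 : dms.any (fun dm => pyTruthyGet dm "linkedin_url") <;>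
    by_cases h3 : dms.length >= 2 <;>
      simp [h1, h2, h3, List.filter, pvPoints, pyAssocGet]
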